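-- pv_equiv track=rewrite | github.com/alexander-cohen/SG-Design-Classification | sg_design_finder.py | make_all_lines
-- ===== SOURCE A (Python) =====
-- import itertools
--
-- def make_all_lines(n, maxlen = None):
--     if maxlen == None:
--         maxlen = n
--
--     all_lines_with_len = {}
--
--     # initialize list of all lines for each possible length
--     for i in range(3, maxlen+1):
--         all_lines_with_len[i] = list(itertools.combinations(list(range(n)), i))
--
--     lines_through_each_with_len = [{} for i in range(n)]
--
--     # intiialize empty array for lines of each length through point
--     for i in range(n):
--         for j in range(3, maxlen+1):
--             lines_through_each_with_len[i][j] = []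
--
--     # add relevant lines to entries in array
--     for line_len in range(3, maxlen+1):
--         for line in all_lines_with_len[line_len]:
--             for p in line:
--                 lines_through_each_with_len[p][line_len].append(line)
--
--     return all_lines_with_len, lines_through_each_with_len
-- ===== SOURCE B (Python) =====
-- import itertools
--
-- def make_all_lines(n, maxlen=None):
--     if maxlen is None:
--         maxlen = n
--     lens = range(3, maxlen + 1)
--     pts = range(n)
--     all_lines_with_len = {L: list(itertools.combinations(pts, L)) for L in lens}
--     lines_through_each_with_len = [
--         {L: [line for line in all_lines_with_len[L] if p in line] for L in lens}
--         for p in pts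
--     ]
--     return all_lines_with_len, lines_through_each_with_len
-- ===== Notes on version B (the rewrite author's own statement) =====
-- stated objective: simpler
-- what changed: A scatters each line into per-point buckets via a triple nested index loop mutating a list of dicts; B builds the dict by comprehension and gathers each point's buckets directly by filtering the combination lists, with no mutation or index arithmetic.
import Mathlib
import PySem

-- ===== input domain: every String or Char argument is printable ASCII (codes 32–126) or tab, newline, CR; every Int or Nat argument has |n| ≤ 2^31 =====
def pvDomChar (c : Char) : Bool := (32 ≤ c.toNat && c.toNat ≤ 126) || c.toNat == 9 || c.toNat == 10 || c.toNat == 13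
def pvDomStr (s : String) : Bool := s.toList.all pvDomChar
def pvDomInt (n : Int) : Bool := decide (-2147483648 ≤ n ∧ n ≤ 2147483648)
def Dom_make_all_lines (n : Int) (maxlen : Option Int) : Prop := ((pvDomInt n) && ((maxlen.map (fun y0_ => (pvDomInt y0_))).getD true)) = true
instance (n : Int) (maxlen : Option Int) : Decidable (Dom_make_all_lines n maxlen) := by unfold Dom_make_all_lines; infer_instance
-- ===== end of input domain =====

-- B replaces A's triple nested scatter loop (mutating a list of dicts in place) by direct
-- per-point gathering: each bucket is a filter of the combination list; simpler, no mutation.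

-- ===== PORT A =====
-- Python A builds dicts by repeated assignment and mutates lists/dicts in place; ported with
-- PySem.Dict and List.modify. Indices i, p are drawn from range(n) / combinations of range(n),
-- hence nonnegative, so `.toNat` is exact there.
def make_all_lines (n : Int) (maxlen : Option Int) : (List (Int × List (List Int))) × (List (List (Int × List (List Int)))) :=
  let m : Int := match maxlen with | none => n | some v => v
  let lens := PySem.List.pyRange 3 (m + 1) 1
  let pts := PySem.List.pyRange 0 n 1
  -- for i in range(3, maxlen+1): all_lines_with_len[i] = list(itertools.combinations(list(range(n)), i))
  let all : PySem.Dict Int (List (List Int)) :=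
    lens.foldl (fun d i => d.insert i (PySem.List.combinations pts i.toNat)) (PySem.Dict.mk [])
  -- lines_through_each_with_len = [{} for i in range(n)]
  let lt0 : List (PySem.Dict Int (List (List Int))) := pts.map (fun _ => PySem.Dict.mk [])
  -- for i in range(n): for j in range(3, maxlen+1): lines_through_each_with_len[i][j] = []
  let lt1 := pts.foldl
    (fun acc i => acc.modify i.toNat (fun d => lens.foldl (fun d j => d.insert j ([] : List (List Int))) d)) lt0
  -- for line_len …: for line in all_lines_with_len[line_len]: for p in line: ….append(line)
  -- (all_lines_with_len[line_len] always present: ported with getD; append = Dict.modify with the existing key)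
  let lt2 := lens.foldl (fun acc L =>
      (all.getD L []).foldl (fun acc line =>
        line.foldl (fun acc p =>
          acc.modify p.toNat (fun d => d.modify L [] (fun ls => ls ++ [line]))) acc) acc) lt1
  (all.items, lt2.map (fun d => d.items))

-- ===== PORT B =====
-- Source B: dict comprehensions over range(3, maxlen+1) with distinct keys → the association list of
-- pairs in generation order; per-point buckets are list-comprehension filters of all_lines_with_len[L].
def make_all_lines_alt (n : Int) (maxlen : Option Int) : (List (Int × List (List Int))) × (List (List (Int × List (List Int)))) :=
  let m : Int := maxlen.getD n
  let lens := PySem.List.pyRange 3 (m + 1) 1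
  let pts := PySem.List.pyRange 0 n 1
  let all : PySem.Dict Int (List (List Int)) :=
    PySem.Dict.mk (lens.map (fun L => (L, PySem.List.combinations pts L.toNat)))
  let per := pts.map (fun p =>
    lens.map (fun L => (L, (all.getD L []).filter (fun line => line.contains p))))
  (all.items, per)

-- ===== PRECONDITION & SPEC =====
def Spec_make_all_lines (n : Int) (maxlen : Option Int) (out : (List (Int × List (List Int))) × (List (List (Int × List (List Int))))) : Prop := out = make_all_lines_alt n maxlen
instance (n : Int) (maxlen : Option Int) (out : (List (Int × List (List Int))) × (List (List (Int × List (List Int))))) : Decidable (Spec_make_all_lines n maxlen out) := by unfold Spec_make_all_lines; infer_instance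

-- ===== CLAIM (what is proved, stated in full; the proofs are below) =====
def Claim_equal_make_all_lines : Prop := ∀ (n : Int) (maxlen : Option Int), Dom_make_all_lines n maxlen → Spec_make_all_lines n maxlen (make_all_lines n maxlen)

-- ===== LEMMAS AND PROOFS =====

lemma pv_items_foldl_insert (ks : List Int) (f : Int → List (List Int))
    (d : PySem.Dict Int (List (List Int)))
    (h : ∀ k ∈ ks, d.contains k = false) (hnd : ks.Nodup) :
    (ks.foldl (fun d k => d.insert k (f k)) d).items = d.items ++ ks.map (fun k => (k, f k)) := by
  induction ks generalizing d with
  | nil => simp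
  | cons k ks ih =>
    simp only [List.foldl_cons, List.map_cons]
    have hdk : d.contains k = false := h k (by simp)
    have hins : (d.insert k (f k)).items = d.items ++ [(k, f k)] := by
      simp [PySem.Dict.insert, hdk]
    rw [ih]
    · simp [hins]
    · intro k' hk'
      have hc : (d.insert k (f k)).contains k' = (d.contains k' || (k == k')) := by
        simp [PySem.Dict.contains, hins]
      rw [hc]
      have h1 : d.contains k' = false := h k' (List.mem_cons_of_mem _ hk')
      have h2 : (k == k') = false := by
        have : k ≠ k' := by rintro rfl; exact (List.nodup_cons.mp hnd).1 hk'
        simp [this]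
      simp [h1, h2]
    · exact (List.nodup_cons.mp hnd).2

lemma pv_getD_mk_map (ks : List Int) (f : Int → List (List Int)) (L : Int)
    (dflt : List (List Int)) (hL : L ∈ ks) :
    (PySem.Dict.mk (ks.map (fun k => (k, f k)))).getD L dflt = f L := by
  induction ks with
  | nil => simp at hL
  | cons k ks ih =>
    simp only [List.map_cons]
    by_cases hk : k = L
    · subst hk
      simp [PySem.Dict.getD, PySem.Dict.get?_mk_cons]
    · have hL' : L ∈ ks := by
        rcases List.mem_cons.mp hL with h | h
        · exact absurd h.symm hk
        · exact h
      have := ih hL'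
      simp only [PySem.Dict.getD] at this ⊢
      rw [PySem.Dict.get?_mk_cons]
      simp [hk, this]

lemma pv_contains_mk_map (ks : List Int) (f : Int → List (List Int)) (L : Int) (hL : L ∈ ks) :
    (PySem.Dict.mk (ks.map (fun k => (k, f k)))).contains L = true := by
  simp only [PySem.Dict.contains, List.any_map, List.any_eq_true]
  exact ⟨L, hL, by simp⟩

lemma pv_modify_mk_map (ks : List Int) (f : Int → List (List Int)) (L0 : Int)
    (g : List (List Int) → List (List Int)) (hL : L0 ∈ ks) :
    (PySem.Dict.mk (ks.map (fun k => (k, f k)))).modify L0 [] g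
      = PySem.Dict.mk (ks.map (fun k => (k, if k = L0 then g (f L0) else f k))) := by
  rw [PySem.Dict.modify, pv_getD_mk_map ks f L0 [] hL, PySem.Dict.insert,
    pv_contains_mk_map ks f L0 hL]
  simp only [if_true, List.map_map]
  congr 1
  apply List.map_congr_left
  intro k _
  by_cases hk : k = L0 <;> simp [hk]

lemma pv_foldl_modify_idx {α : Type} (ps : List Int) (g : α → α) (acc : List α)
    (hnd : ps.Nodup) (hpos : ∀ p ∈ ps, 0 ≤ p) :
    ps.foldl (fun a p => a.modify p.toNat g) acc
      = acc.mapIdx (fun j x => if (j : Int) ∈ ps then g x else x) := by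
  induction ps generalizing acc with
  | nil =>
    apply List.ext_getElem <;> simp
  | cons p ps ih =>
    simp only [List.foldl_cons]
    rw [ih (acc.modify p.toNat g) (List.nodup_cons.mp hnd).2
      (fun q hq => hpos q (List.mem_cons_of_mem _ hq))]
    have hp0 : (0 : Int) ≤ p := hpos p (by simp)
    have hpn : p ∉ ps := (List.nodup_cons.mp hnd).1
    apply List.ext_getElem
    · simp
    · intro j h1 h2
      rw [List.getElem_mapIdx, List.getElem_mapIdx, List.getElem_modify]
      by_cases hj : (j : Int) = p
      · have : p.toNat = j := by omega
        simp [this, hj, hpn]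
      · have : p.toNat ≠ j := by omega
        simp only [this, if_false]
        simp [List.mem_cons, hj]

lemma pv_scatter (lens pts : List Int) (_hlnd : lens.Nodup)
    (hpts : ∀ (j : Nat) (h : j < pts.length), pts[j] = (j : Int))
    (todo done : List (Int × List Int))
    (hq : ∀ q ∈ todo, q.1 ∈ lens ∧ q.2.Nodup ∧ ∀ p ∈ q.2, 0 ≤ p) :
    todo.foldl (fun acc q =>
        q.2.foldl (fun a p => a.modify p.toNat (fun d => d.modify q.1 [] (fun ls => ls ++ [q.2]))) acc)
      (pts.map (fun p => PySem.Dict.mk (lens.map (fun L =>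
        (L, (done.filter (fun q => q.1 == L && q.2.contains p)).map (fun q => q.2))))))
    = pts.map (fun p => PySem.Dict.mk (lens.map (fun L =>
        (L, ((done ++ todo).filter (fun q => q.1 == L && q.2.contains p)).map (fun q => q.2))))) := by
  induction todo generalizing done with
  | nil => simp
  | cons q todo ih =>
    obtain ⟨hq1, hq2, hq3⟩ := hq q (by simp)
    simp only [List.foldl_cons]
    have hstep :
        q.2.foldl (fun a p => a.modify p.toNat (fun d => d.modify q.1 [] (fun ls => ls ++ [q.2])))
          (pts.map (fun p => PySem.Dict.mk (lens.map (fun L =>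
            (L, (done.filter (fun r => r.1 == L && r.2.contains p)).map (fun r => r.2))))))
        = pts.map (fun p => PySem.Dict.mk (lens.map (fun L =>
            (L, ((done ++ [q]).filter (fun r => r.1 == L && r.2.contains p)).map (fun r => r.2))))) := by
      rw [pv_foldl_modify_idx q.2 _ _ hq2 hq3]
      apply List.ext_getElem
      · simp
      · intro j h1 h2
        rw [List.getElem_mapIdx]
        simp only [List.getElem_map]
        rw [hpts j (by simpa using h1)]
        by_cases hj : (j : Int) ∈ q.2
        · simp only [hj, if_true]
          rw [pv_modify_mk_map lens _ q.1 _ hq1]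
          congr 1
          apply List.map_congr_left
          intro L hLmem
          have hcont : q.2.contains (j : Int) = true := by
            simpa [List.contains_iff_mem] using hj
          by_cases hLq : L = q.1
          · subst hLq
            simp [List.filter_append, hj]
          · have hne : (q.1 == L) = false := by simp [Ne.symm hLq]
            simp only [hLq, if_false]
            simp [List.filter_append, hne]
        · simp only [hj, if_false]
          congr 1
          apply List.map_congr_left
          intro L hLmem
          simp only [List.filter_append, List.map_append]
          simp
          exact fun _ => hj
    rw [hstep, ih (done ++ [q]) (fun r hr => hq r (List.mem_cons_of_mem _ hr))]
    simp

lemma pv_flat_filter (ks : List Int) (v : Int → List (List Int)) (L p : Int)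
    (hnd : ks.Nodup) (hL : L ∈ ks) :
    ((ks.flatMap (fun k => (v k).map (fun line => (k, line)))).filter
        (fun q => q.1 == L && q.2.contains p)).map (fun q => q.2)
      = (v L).filter (fun line => line.contains p) := by
  induction ks with
  | nil => simp at hL
  | cons k ks ih =>
    simp only [List.flatMap_cons, List.filter_append, List.map_append, List.filter_map]
    by_cases hk : k = L
    · subst hk
      have hrest : ((ks.flatMap (fun k => (v k).map (fun line => (k, line)))).filter
          (fun q => q.1 == k && q.2.contains p)) = [] := by
        rw [List.filter_eq_nil_iff]
        intro q hqmem
        rcases List.mem_flatMap.mp hqmem with ⟨k', hk', hq'⟩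
        rcases List.mem_map.mp hq' with ⟨line, _, rfl⟩
        have : k' ≠ k := by
          rintro rfl; exact (List.nodup_cons.mp hnd).1 hk'
        simp [this]
      rw [hrest]
      simp [Function.comp_def, List.map_map]
    · have hL' : L ∈ ks := by
        rcases List.mem_cons.mp hL with h | h
        · exact absurd h.symm hk
        · exact h
      have hkL : (k == L) = false := by simp [hk]
      simp only [Function.comp_def]
      simp [hkL]
      simpa using ih (List.nodup_cons.mp hnd).2 hL'

lemma pv_make_all_lines_eq (n : Int) (maxlen : Option Int) :
    make_all_lines n maxlen = make_all_lines_alt n maxlen := by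
  unfold make_all_lines make_all_lines_alt
  have hm : (match maxlen with | none => n | some v => v) = maxlen.getD n := by
    cases maxlen <;> rfl
  rw [hm]
  simp only []
  set m := maxlen.getD n with hmdef
  set lens := PySem.List.pyRange 3 (m + 1) 1 with hlens
  set pts := PySem.List.pyRange 0 n 1 with hptsdef
  have hlnd : lens.Nodup := by rw [hlens]; exact PySem.List.nodup_pyRange_one 3 (m + 1)
  have hptsnd : pts.Nodup := by rw [hptsdef]; exact PySem.List.nodup_pyRange_one 0 n
  have hptsidx : ∀ (j : Nat) (h : j < pts.length), pts[j] = (j : Int) := by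
    intro j h
    have h' : j < (PySem.List.pyRange 0 n 1).length := by simpa [hptsdef] using h
    have := PySem.List.getElem_pyRange_one 0 n j h'
    simpa [hptsdef] using this
  have hptsnn : ∀ p ∈ pts, (0 : Int) ≤ p := by
    intro p hp
    rw [hptsdef] at hp
    exact (PySem.List.mem_pyRange_one.mp hp).1
  set comb := fun L : Int => PySem.List.combinations pts L.toNat with hcomb
  -- the dict of all lines
  have hall : (lens.foldl (fun d i => d.insert i (comb i)) (PySem.Dict.mk []))
      = PySem.Dict.mk (lens.map (fun L => (L, comb L))) := by
    apply PySem.Dict.ext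
    rw [pv_items_foldl_insert lens comb (PySem.Dict.mk [])
      (by intro k _; simp [PySem.Dict.contains]) hlnd]
    rfl
  rw [hall]
  -- the initialization loop
  have hinit : pts.foldl
      (fun acc i => acc.modify i.toNat (fun d => lens.foldl (fun d j => d.insert j ([] : List (List Int))) d))
      (pts.map (fun _ => PySem.Dict.mk []))
      = pts.map (fun _ => PySem.Dict.mk (lens.map (fun L => (L, ([] : List (List Int)))))) := by
    rw [pv_foldl_modify_idx pts _ _ hptsnd hptsnn]
    apply List.ext_getElem
    · simp
    · intro j h1 h2
      rw [List.getElem_mapIdx]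
      simp only [List.getElem_map]
      have hjmem : ((j : Int)) ∈ pts := by
        rw [hptsdef]
        refine PySem.List.mem_pyRange_one.mpr ⟨by omega, ?_⟩
        have : j < pts.length := by simpa using h1
        rw [hptsdef, PySem.List.length_pyRange_one] at this
        omega
      simp only [hjmem, if_true]
      apply PySem.Dict.ext
      rw [pv_items_foldl_insert lens (fun _ => []) (PySem.Dict.mk [])
        (by intro k _; simp [PySem.Dict.contains]) hlnd]
      rfl
  rw [hinit]
  -- the scatter loop
  set flat := lens.flatMap (fun L => (comb L).map (fun line => (L, line))) with hflat
  have hsc1 : lens.foldl (fun acc L =>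
        ((PySem.Dict.mk (lens.map (fun L => (L, comb L)))).getD L []).foldl (fun acc line =>
          line.foldl (fun acc p =>
            acc.modify p.toNat (fun d => d.modify L [] (fun ls => ls ++ [line]))) acc) acc)
      (pts.map (fun _ => PySem.Dict.mk (lens.map (fun L => (L, ([] : List (List Int)))))))
      = flat.foldl (fun acc q =>
          q.2.foldl (fun a p => a.modify p.toNat (fun d => d.modify q.1 [] (fun ls => ls ++ [q.2]))) acc)
        (pts.map (fun _ => PySem.Dict.mk (lens.map (fun L => (L, ([] : List (List Int))))))) := by
    rw [hflat, List.foldl_flatMap]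
    apply PySem.List.foldl_congr_mem
    intro acc L hL
    rw [List.foldl_map, pv_getD_mk_map lens comb L [] hL]
  rw [hsc1]
  have hq : ∀ q ∈ flat, q.1 ∈ lens ∧ q.2.Nodup ∧ ∀ p ∈ q.2, 0 ≤ p := by
    intro q hqm
    rw [hflat] at hqm
    rcases List.mem_flatMap.mp hqm with ⟨L, hL, hq'⟩
    rcases List.mem_map.mp hq' with ⟨line, hline, rfl⟩
    have hsub : line.Sublist pts := PySem.List.sublist_of_mem_combinations hline
    exact ⟨hL, hsub.nodup hptsnd, fun p hp => hptsnn p (hsub.mem hp)⟩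
  have hsc2 := pv_scatter lens pts hlnd hptsidx flat [] hq
  simp only [List.filter_nil, List.map_nil, List.nil_append] at hsc2
  rw [hsc2]
  -- assemble
  refine Prod.ext rfl ?_
  simp only [List.map_map]
  apply List.map_congr_left
  intro p _
  simp only [Function.comp_apply]
  show (PySem.Dict.mk _).items = _
  simp only []
  apply List.map_congr_left
  intro L hL
  rw [pv_flat_filter lens comb L p hlnd hL, pv_getD_mk_map lens comb L [] hL]

-- ===== VERDICT (by name: the statement is the Claim_ definition above) =====
theorem make_all_lines_spec : Claim_equal_make_all_lines := by
  intro n maxlen _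
  unfold Spec_make_all_lines
  exact pv_make_all_lines_eq n maxlen
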